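-- pv_equiv track=rewrite | github.com/gameofbusiness/document-generator | isolator.py | isolate_prods_in_coll
-- ===== SOURCE A (Python) =====
-- def isolate_prods_in_coll(coll):
-- 	prods = []
-- 	prod = []
--
-- 	prod_row_len = 20
--
-- 	# this is 1 method
-- 	# another method is to list row nums with new prod and then gather items bt those row nums
-- 	for row_idx in range(len(coll)):
-- 		row = coll[row_idx]
-- 		if row_idx == 0:
-- 			prod.append(row)
-- 		elif len(row) != prod_row_len:
-- 			prod.append(row)
-- 		else:
-- 			prods.append(prod)
-- 			prod = []
-- 			prod.append(row)
--
-- 		if row_idx == len(coll)-1: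
-- 			prods.append(prod)
--
-- 	return prods
-- ===== SOURCE B (Python) =====
-- def isolate_prods_in_coll(coll):
-- 	if not coll:
-- 		return []
-- 	bounds = [0] + [i for i in range(1, len(coll)) if len(coll[i]) == 20]
-- 	return [coll[b:e] for b, e in zip(bounds, bounds[1:] + [len(coll)])]
-- ===== Notes on version B (the rewrite author's own statement) =====
-- stated objective: alternative
-- what changed: Replaces A's single accumulate-as-you-go pass carrying a current-group buffer with a two-phase decomposition: first collect the boundary indices (0 plus every later index whose row has length 20), then slice the list between consecutive boundaries.
import Mathlib
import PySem

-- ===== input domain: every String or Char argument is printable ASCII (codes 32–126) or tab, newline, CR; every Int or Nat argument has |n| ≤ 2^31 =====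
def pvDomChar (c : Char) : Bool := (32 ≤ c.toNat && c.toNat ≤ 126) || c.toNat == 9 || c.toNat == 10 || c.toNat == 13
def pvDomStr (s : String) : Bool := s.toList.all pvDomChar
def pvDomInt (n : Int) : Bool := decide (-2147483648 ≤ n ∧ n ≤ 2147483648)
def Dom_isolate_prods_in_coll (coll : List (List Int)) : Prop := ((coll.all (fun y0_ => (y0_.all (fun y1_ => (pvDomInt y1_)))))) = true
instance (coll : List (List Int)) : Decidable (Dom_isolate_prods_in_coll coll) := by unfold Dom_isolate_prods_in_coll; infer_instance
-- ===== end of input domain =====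

-- B replaces A's accumulate-as-you-go pass by a two-phase decomposition (collect the
-- boundary indices, then slice between consecutive boundaries); objective: alternative.

-- ===== PORT A =====
-- the for-loop over range(len(coll)) with state (prods, prod), as structural recursion on the index
def isoLoopA (coll : List (List Int)) (n : Nat) (prods : List (List (List Int)))
    (prod : List (List Int)) (i : Nat) : List (List (List Int)) :=
  if _h : i < n then
    let row := PySem.List.pyGetD coll (i : Int) []
    let s :=
      if i = 0 then (prods, prod ++ [row])
      else if row.length ≠ 20 then (prods, prod ++ [row])
      else (prods ++ [prod], [row])
    let prods' := if i = n - 1 then s.1 ++ [s.2] else s.1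
    isoLoopA coll n prods' s.2 (i + 1)
  else prods
termination_by n - i

def isolate_prods_in_coll (coll : List (List Int)) : List (List (List Int)) :=
  isoLoopA coll coll.length [] [] 0

-- ===== PORT B =====
def isolate_prods_in_coll_alt (coll : List (List Int)) : List (List (List Int)) :=
  if coll = [] then []
  else
    let n : Int := coll.length
    let bounds : List Int :=
      0 :: (PySem.List.pyRange 1 n 1).filter
        (fun i => (PySem.List.pyGetD coll i []).length == 20)
    (bounds.zip (PySem.List.slice bounds (some 1) none ++ [n])).map
      (fun be => PySem.List.slice coll (some be.1) (some be.2))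

-- ===== PRECONDITION & SPEC =====
def Spec_isolate_prods_in_coll (coll : List (List Int)) (out : List (List (List Int))) : Prop := out = isolate_prods_in_coll_alt coll
instance (coll : List (List Int)) (out : List (List (List Int))) : Decidable (Spec_isolate_prods_in_coll coll out) := by unfold Spec_isolate_prods_in_coll; infer_instance

-- ===== CLAIM (what is proved, stated in full; the proofs are below) =====
def Claim_equal_isolate_prods_in_coll : Prop := ∀ (coll : List (List Int)), Dom_isolate_prods_in_coll coll → Spec_isolate_prods_in_coll coll (isolate_prods_in_coll coll)

-- ===== LEMMAS AND PROOFS =====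

-- common characterisation: groups of the suffix starting at index i, current group `prod`
def pvRest (coll : List (List Int)) (n i : Nat) (prod : List (List Int)) :
    List (List (List Int)) :=
  if _h : i < n then
    let row := coll.getD i []
    if row.length = 20 then prod :: pvRest coll n (i + 1) [row]
    else pvRest coll n (i + 1) (prod ++ [row])
  else [prod]
termination_by n - i

lemma pvGetD_cast (coll : List (List Int)) (i : Nat) :
    PySem.List.pyGetD coll (i : Int) [] = coll.getD i [] := by
  simp [PySem.List.pyGetD_natCast]

-- A's loop, from any index 1 ≤ i < n, is prods ++ pvRest
lemma isoLoopA_eq (coll : List (List Int)) :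
    ∀ (fuel i : Nat) (prods : List (List (List Int))) (prod : List (List Int)),
      coll.length - i ≤ fuel → 1 ≤ i → i < coll.length →
      isoLoopA coll coll.length prods prod i = prods ++ pvRest coll coll.length i prod := by
  intro fuel
  induction fuel with
  | zero => intro i prods prod hf h1 hlt; omega
  | succ k ih =>
    intro i prods prod hf h1 hlt
    rw [isoLoopA, pvRest]
    simp only [hlt, dif_pos, if_neg (by omega : ¬ i = 0), pvGetD_cast]
    by_cases hm : (coll.getD i []).length = 20
    · rw [if_neg (not_not.mpr hm), if_pos hm]
      by_cases hl : i = coll.length - 1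
      · have hn : ¬ i + 1 < coll.length := by omega
        rw [if_pos hl, isoLoopA, dif_neg hn, pvRest, dif_neg hn]
        simp
      · have hlt' : i + 1 < coll.length := by omega
        rw [if_neg hl, ih (i + 1) _ _ (by omega) (by omega) hlt']
        simp
    · rw [if_pos hm, if_neg hm]
      by_cases hl : i = coll.length - 1
      · have hn : ¬ i + 1 < coll.length := by omega
        rw [if_pos hl, isoLoopA, dif_neg hn, pvRest, dif_neg hn]
      · have hlt' : i + 1 < coll.length := by omega
        rw [if_neg hl, ih (i + 1) _ _ (by omega) (by omega) hlt']

lemma A_eq_pvRest (coll : List (List Int)) (h : coll ≠ []) :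
    isolate_prods_in_coll coll = pvRest coll coll.length 1 [coll.getD 0 []] := by
  have h0 : 0 < coll.length := List.length_pos_iff.mpr h
  rw [isolate_prods_in_coll, isoLoopA]
  simp only [h0, dif_pos, pvGetD_cast]
  by_cases h1 : coll.length = 1
  · have hn : ¬ (1 : Nat) < coll.length := by omega
    have : (0 : Nat) = coll.length - 1 := by omega
    rw [if_pos this, isoLoopA, dif_neg (by omega : ¬ 0 + 1 < coll.length), pvRest,
      dif_neg (by omega : ¬ (1 : Nat) < coll.length)]
    simp
  · have : ¬ (0 : Nat) = coll.length - 1 := by omega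
    rw [if_neg this]
    exact isoLoopA_eq coll (coll.length - 1) (0 + 1) [] _ (by omega) (by omega) (by omega)

-- B's boundary list for the suffix starting at index i
def pvBs (coll : List (List Int)) (i : Nat) : List Int :=
  (PySem.List.pyRange (i : Int) (coll.length : Int) 1).filter
    (fun j => (PySem.List.pyGetD coll j []).length == 20)

lemma pvBs_step (coll : List (List Int)) (i : Nat) (h : i < coll.length) :
    pvBs coll i = (if (coll.getD i []).length = 20 then [(i : Int)] else []) ++ pvBs coll (i + 1) := by
  unfold pvBs
  rw [PySem.List.pyRange_one_cons (by exact_mod_cast h)]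
  simp only [List.filter_cons, pvGetD_cast, beq_iff_eq]
  push_cast
  split_ifs <;> simp

lemma pvBs_end (coll : List (List Int)) (i : Nat) (h : ¬ i < coll.length) :
    pvBs coll i = [] := by
  unfold pvBs
  rw [PySem.List.pyRange_one_eq_nil (by exact_mod_cast Nat.le_of_not_lt h)]
  rfl

lemma take_extend (coll : List (List Int)) (b i : Nat) (hb : b ≤ i) (hi : i < coll.length) :
    (coll.drop b).take (i + 1 - b) = (coll.drop b).take (i - b) ++ [coll.getD i []] := by
  have h1 : i + 1 - b = (i - b) + 1 := by omega
  rw [h1, List.take_add_one]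
  have h2 : (coll.drop b)[i - b]? = coll[i]? := by
    rw [List.getElem?_drop]; congr 1; omega
  rw [h2, List.getElem?_eq_getElem hi]
  simp [List.getD, List.getElem?_eq_getElem hi]

-- B's slice phase, from any boundary state, is pvRest
lemma B_slices_eq (coll : List (List Int)) :
    ∀ (fuel i b : Nat), coll.length - i ≤ fuel → b ≤ i → i ≤ coll.length →
      (((b : Int) :: pvBs coll i).zip (pvBs coll i ++ [(coll.length : Int)])).map
        (fun be => PySem.List.slice coll (some be.1) (some be.2))
      = pvRest coll coll.length i ((coll.drop b).take (i - b)) := by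
  intro fuel
  induction fuel with
  | zero =>
    intro i b hf hb hi
    have hie : i = coll.length := by omega
    rw [pvBs_end coll i (by omega), pvRest, dif_neg (by omega)]
    simp [PySem.List.slice_natCast, hie]
  | succ k ih =>
    intro i b hf hb hi
    by_cases h : i < coll.length
    · rw [pvBs_step coll i h, pvRest, dif_pos h]
      by_cases hm : (coll.getD i []).length = 20
      · rw [if_pos hm, if_pos hm]
        simp only [List.nil_append, List.cons_append, List.zip_cons_cons, List.map_cons]
        rw [ih (i + 1) i (by omega) (by omega) (by omega)]
        congr 1
        · rw [PySem.List.slice_natCast]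
        · congr 1
          rw [show i + 1 - i = 1 by omega]
          simp [List.take_one, List.head?_drop, List.getD,
            List.getElem?_eq_getElem h]
      · rw [if_neg hm, if_neg hm, List.nil_append,
          ih (i + 1) b (by omega) (by omega) (by omega),
          take_extend coll b i hb h]
    · have hie : i = coll.length := by omega
      rw [pvBs_end coll i (by omega), pvRest, dif_neg (by omega)]
      simp [PySem.List.slice_natCast, hie]

lemma B_eq_pvRest (coll : List (List Int)) (h : coll ≠ []) :
    isolate_prods_in_coll_alt coll = pvRest coll coll.length 1 [coll.getD 0 []] := by
  have h0 : 0 < coll.length := List.length_pos_iff.mpr h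
  rw [isolate_prods_in_coll_alt, if_neg h]
  simp only [PySem.List.slice_from_one, List.tail_cons]
  have hz : (0 : Int) = ((0 : Nat) : Int) := by norm_num
  have h1 : pvBs coll 1 = (PySem.List.pyRange 1 (coll.length : Int) 1).filter
      (fun j => (PySem.List.pyGetD coll j []).length == 20) := by
    unfold pvBs; norm_num
  rw [hz, ← h1, B_slices_eq coll coll.length 1 0 (by omega) (by omega) (by omega)]
  congr 1
  rw [List.drop_zero, show (1 : Nat) - 0 = 1 by omega]
  simp [List.take_one, List.getD, List.head?_eq_getElem?, List.getElem?_eq_getElem h0]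

-- ===== VERDICT (by name: the statement is the Claim_ definition above) =====
theorem isolate_prods_in_coll_spec : Claim_equal_isolate_prods_in_coll := by
  intro coll _hdom
  unfold Spec_isolate_prods_in_coll
  by_cases h : coll = []
  · subst h
    rw [isolate_prods_in_coll, isoLoopA, isolate_prods_in_coll_alt]
    simp
  · rw [A_eq_pvRest coll h, B_eq_pvRest coll h]
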